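-- pv_equiv track=rewrite | github.com/linsomniac/symbolicmode | chmod.py | symbolic_to_numeric_permissions
-- ===== SOURCE A (Python) =====
-- def symbolic_to_numeric_permissions(
--     symbolic_perm: str, is_exe_or_directory: bool = False
-- ) -> int:
--     """
--     Convert a symbolic file permission string to its numeric equivalent.
--
--     The function takes a symbolic permission description string in the format of
--     `user[=,+,-]permissions,group[=,+,-]permissions,other[=,+,-]permissions`.
--     The available permission characters are `r` (read), `w` (write), `x` (execute),
--     `X` (execute if a directory), `s` (setuid/setgid), and `t` (sticky bit).
--
--     Args:
--         symbolic_perm (str): The symbolic permission description string.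
--         is_exe_or_directory (bool, optional): A boolean indicating whether the file is a directory.
--                 This affects the behavior of the `X` permission. Defaults to False.
--
--     Returns:
--         int: The numeric (octal) representation of the file permissions.
--
--     Examples:
--         >>> symbolic_to_numeric_permissions("u=rwx,g=rx,o=r")
--         0o754
--         >>> symbolic_to_numeric_permissions("u=rwX", is_directory=True)
--         0o700
--         >>> symbolic_to_numeric_permissions("u=rws,g=rx,o=r")
--         0o4754
--     """
--     # Define a mapping of symbolic permission characters to their corresponding numeric values
--     perm_values = {"r": 4, "w": 2, "x": 1, "X": 1 if is_exe_or_directory else 0, "-": 0}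
--
--     # Initialize variables to represent the numeric file mode for the owner (user), group, and others
--     owner_perm = 0
--     group_perm = 0
--     other_perm = 0
--
--     # Initialize variables for setuid, setgid, and sticky bits
--     setuid_bit = 0
--     setgid_bit = 0
--     sticky_bit = 0
--
--     # Parse the input symbolic permission description into a list of individual permission instructions
--     instructions = symbolic_perm.split(",")
--
--     # Apply each instruction to the appropriate numeric file mode variables
--     for instruction in instructions:
--         # Determine which set of users the instruction applies to, the operation, and the permission
--         users, operation, perms = instruction.partition("=")
--         if not operation:
--             users, operation, perms = instruction.partition("+")
--         if not operation:
--             users, operation, perms = instruction.partition("-")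
--
--         # Determine the numeric value of the permissions
--         perm_sum = sum(perm_values.get(p, perm_values.get(p.upper(), 0)) for p in perms)
--
--         def update_perm(operation, perm_sum, current_perm):
--             if operation == "=":
--                 return perm_sum
--             if operation == "+":
--                 return current_perm | perm_sum
--             return current_perm & ~perm_sum
--
--         # Update the numeric file mode variables based on the users and operation
--         if "u" in users or "a" in users:
--             owner_perm = update_perm(operation, perm_sum, owner_perm)
--             # Handle setuid bit
--             if "s" in perms:
--                 setuid_bit = 4 if operation in "+=" else 0
--         if "g" in users or "a" in users:
--             group_perm = update_perm(operation, perm_sum, group_perm)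
--             # Handle setgid bit
--             if "s" in perms:
--                 setgid_bit = 2 if operation in "+=" else 0
--         if "o" in users or "a" in users:
--             other_perm = update_perm(operation, perm_sum, other_perm)
--             # Handle sticky bit
--             if "t" in perms:
--                 sticky_bit = 1 if operation in "+=" else 0
--
--     # Combine the numeric file modes for the owner, group, and others into a single numeric file mode
--     numeric_perm = (
--         (setuid_bit + setgid_bit + sticky_bit) * 8**3
--         + owner_perm * 8**2
--         + group_perm * 8**1
--         + other_perm
--     )
--
--     return numeric_perm
-- ===== SOURCE B (Python) =====
-- def symbolic_to_numeric_permissions(symbolic_perm, is_exe_or_directory=False):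
--     x_val = 1 if is_exe_or_directory else 0
--
--     # Stage 1: parse every instruction once into (users, op, perm_sum, has_s, has_t).
--     parsed = []
--     for instruction in symbolic_perm.split(","):
--         op = ""
--         cut = len(instruction)
--         for sep in "=+-":
--             pos = instruction.find(sep)
--             if pos != -1:
--                 op, cut = sep, pos
--                 break
--         users = instruction[:cut]
--         perms = instruction[cut + 1:] if op else ""
--         perm_sum = (4 * perms.count("r") + 2 * perms.count("w")
--                     + perms.count("x") + x_val * perms.count("X"))
--         parsed.append((users, op, perm_sum, "s" in perms, "t" in perms))
--
--     # Stage 2: one independent fold over the parsed list per permission class.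
--     def resolve(who, use_t):
--         perm, flag = 0, 0
--         for users, op, perm_sum, has_s, has_t in parsed:
--             if who in users or "a" in users:
--                 if op == "=":
--                     perm = perm_sum
--                 elif op == "+":
--                     perm |= perm_sum
--                 else:
--                     perm &= ~perm_sum
--                 if has_t if use_t else has_s:
--                     flag = 0 if op == "-" else 1
--         return perm, flag
--
--     u_perm, su = resolve("u", False)
--     g_perm, sg = resolve("g", False)
--     o_perm, st = resolve("o", True)
--     return (4 * su + 2 * sg + st) * 512 + u_perm * 64 + g_perm * 8 + o_perm
-- ===== Notes on version B (the rewrite author's own statement) =====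
-- stated objective: alternative
-- what changed: Restructures the single simultaneous pass over six scalars into a staged pipeline: one parsing pass builds a list of (users, op, perm_sum, has_s, has_t) records (separator located by str.find instead of the partition fallback chain, perm_sum by counting occurrences of r/w/x/X instead of a per-char dict-lookup sum), then three independent folds over that list - one per permission class, with 0/1 special flags scaled only at assembly - compute the final mode.
import Mathlib
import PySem

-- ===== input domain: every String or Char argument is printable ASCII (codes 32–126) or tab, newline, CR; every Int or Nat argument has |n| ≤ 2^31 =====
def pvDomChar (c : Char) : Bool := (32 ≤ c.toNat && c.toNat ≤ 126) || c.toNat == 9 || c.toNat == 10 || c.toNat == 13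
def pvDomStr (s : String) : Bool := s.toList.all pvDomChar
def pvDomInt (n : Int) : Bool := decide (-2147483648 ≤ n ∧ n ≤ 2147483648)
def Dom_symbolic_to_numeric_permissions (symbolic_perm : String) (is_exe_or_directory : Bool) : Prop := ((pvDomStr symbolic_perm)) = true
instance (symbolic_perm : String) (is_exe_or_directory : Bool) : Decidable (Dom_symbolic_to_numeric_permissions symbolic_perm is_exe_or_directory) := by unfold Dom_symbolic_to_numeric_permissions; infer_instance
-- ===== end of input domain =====

-- B restructures A's single simultaneous pass into a staged pipeline (parse once, then one
-- independent fold per permission class); same O(n) cost, no speed claim.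

-- str.partition(sep) for a ONE-CHARACTER separator, ported by hand (PySem has no partition);
-- exact: splits at the first occurrence, returns (s, '', '') when absent. Used by port A.
def pyPartition1 : List Char → Char → List Char × List Char × List Char
  | [], _ => ([], [], [])
  | c :: rest, sep =>
    if c = sep then ([], [sep], rest)
    else
      let r := pyPartition1 rest sep
      (c :: r.1, r.2.1, r.2.2)

-- ===== PORT A =====
-- perm_values = {"r": 4, "w": 2, "x": 1, "X": 1 if is_exe_or_directory else 0, "-": 0}
def permValuesA (is_exe_or_directory : Bool) : PySem.Dict Char Int :=
  PySem.Dict.ofList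
    [('r', 4), ('w', 2), ('x', 1), ('X', if is_exe_or_directory then 1 else 0), ('-', 0)]

-- perm_values.get(p, perm_values.get(p.upper(), 0))
def lookupA (d : PySem.Dict Char Int) (p : Char) : Int :=
  d.getD p (d.getD (PySem.Chars.upperChar p) 0)

-- A's partition fallback chain: partition('='); if not operation: partition('+'); if not: partition('-')
def chainA (instruction : List Char) : List Char × List Char × List Char :=
  let t1 := pyPartition1 instruction '='
  let t2 := if t1.2.1 = [] then pyPartition1 instruction '+' else t1
  if t2.2.1 = [] then pyPartition1 instruction '-' else t2

-- the nested update_perm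
def updatePermA (operation : List Char) (perm_sum current : Int) : Int :=
  if operation = ['='] then perm_sum
  else if operation = ['+'] then PySem.Int.bor current perm_sum
  else PySem.Int.band current (Int.not perm_sum)

-- one iteration of A's 'for instruction in instructions' loop; state =
-- (owner_perm, group_perm, other_perm, setuid_bit, setgid_bit, sticky_bit)
def stepA (is_exe_or_directory : Bool) (st : Int × Int × Int × Int × Int × Int)
    (instruction : List Char) : Int × Int × Int × Int × Int × Int :=
  let t := chainA instruction
  let users := t.1
  let operation := t.2.1
  let perms := t.2.2
  let perm_sum := (perms.map (lookupA (permValuesA is_exe_or_directory))).sum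
  let owner_perm := st.1
  let group_perm := st.2.1
  let other_perm := st.2.2.1
  let setuid_bit := st.2.2.2.1
  let setgid_bit := st.2.2.2.2.1
  let sticky_bit := st.2.2.2.2.2
  let (owner_perm, setuid_bit) :=
    if PySem.Chars.isIn ['u'] users || PySem.Chars.isIn ['a'] users then
      (updatePermA operation perm_sum owner_perm,
       if PySem.Chars.isIn ['s'] perms then
         (if PySem.Chars.isIn operation ['+', '='] then 4 else 0)
       else setuid_bit)
    else (owner_perm, setuid_bit)
  let (group_perm, setgid_bit) :=
    if PySem.Chars.isIn ['g'] users || PySem.Chars.isIn ['a'] users then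
      (updatePermA operation perm_sum group_perm,
       if PySem.Chars.isIn ['s'] perms then
         (if PySem.Chars.isIn operation ['+', '='] then 2 else 0)
       else setgid_bit)
    else (group_perm, setgid_bit)
  let (other_perm, sticky_bit) :=
    if PySem.Chars.isIn ['o'] users || PySem.Chars.isIn ['a'] users then
      (updatePermA operation perm_sum other_perm,
       if PySem.Chars.isIn ['t'] perms then
         (if PySem.Chars.isIn operation ['+', '='] then 1 else 0)
       else sticky_bit)
    else (other_perm, sticky_bit)
  (owner_perm, group_perm, other_perm, setuid_bit, setgid_bit, sticky_bit)

def symbolic_to_numeric_permissions (symbolic_perm : String) (is_exe_or_directory : Bool) : Int :=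
  let instructions := PySem.Chars.splitOn symbolic_perm.toList [',']
  let r := instructions.foldl (stepA is_exe_or_directory) (0, 0, 0, 0, 0, 0)
  (r.2.2.2.1 + r.2.2.2.2.1 + r.2.2.2.2.2) * 8 ^ 3 + r.1 * 8 ^ 2 + r.2.1 * 8 ^ 1 + r.2.2.1

-- ===== PORT B =====
-- for sep in "=+-": pos = instruction.find(sep); if pos != -1: op, cut = sep, pos; break
def sepScanB (instruction : List Char) : List Char → List Char × Int
  | [] => ([], (instruction.length : Int))
  | sep :: rest =>
    let pos := PySem.Chars.find instruction [sep]
    if pos ≠ -1 then ([sep], pos) else sepScanB instruction rest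

-- stage 1: one instruction → (users, op, perm_sum, has_s, has_t)
def parseB (x_val : Int) (instruction : List Char) :
    List Char × List Char × Int × Bool × Bool :=
  let oc := sepScanB instruction ['=', '+', '-']
  let op := oc.1
  let cut := oc.2
  let users := PySem.List.slice instruction none (some cut)
  let perms := if op ≠ [] then PySem.List.slice instruction (some (cut + 1)) none else []
  let perm_sum := 4 * (PySem.Chars.count perms ['r'] : Int)
      + 2 * (PySem.Chars.count perms ['w'] : Int)
      + (PySem.Chars.count perms ['x'] : Int)
      + x_val * (PySem.Chars.count perms ['X'] : Int)
  (users, op, perm_sum, PySem.Chars.isIn ['s'] perms, PySem.Chars.isIn ['t'] perms)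

-- stage 2: the body of resolve's loop over the parsed records
def resolveStepB (who : Char) (use_t : Bool) (st : Int × Int)
    (e : List Char × List Char × Int × Bool × Bool) : Int × Int :=
  if PySem.Chars.isIn [who] e.1 || PySem.Chars.isIn ['a'] e.1 then
    let perm :=
      if e.2.1 = ['='] then e.2.2.1
      else if e.2.1 = ['+'] then PySem.Int.bor st.1 e.2.2.1
      else PySem.Int.band st.1 (Int.not e.2.2.1)
    let flag :=
      if (if use_t then e.2.2.2.2 else e.2.2.2.1) then
        (if e.2.1 = ['-'] then (0 : Int) else 1)
      else st.2
    (perm, flag)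
  else st

def resolveB (parsed : List (List Char × List Char × Int × Bool × Bool))
    (who : Char) (use_t : Bool) : Int × Int :=
  parsed.foldl (resolveStepB who use_t) (0, 0)

def symbolic_to_numeric_permissions_alt (symbolic_perm : String) (is_exe_or_directory : Bool) : Int :=
  let x_val : Int := if is_exe_or_directory then 1 else 0
  let parsed := (PySem.Chars.splitOn symbolic_perm.toList [',']).map (parseB x_val)
  let u := resolveB parsed 'u' false
  let g := resolveB parsed 'g' false
  let o := resolveB parsed 'o' true
  (4 * u.2 + 2 * g.2 + o.2) * 512 + u.1 * 64 + g.1 * 8 + o.1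

-- ===== PRECONDITION & SPEC =====
def Spec_symbolic_to_numeric_permissions (symbolic_perm : String) (is_exe_or_directory : Bool) (out : Int) : Prop := out = symbolic_to_numeric_permissions_alt symbolic_perm is_exe_or_directory
instance (symbolic_perm : String) (is_exe_or_directory : Bool) (out : Int) : Decidable (Spec_symbolic_to_numeric_permissions symbolic_perm is_exe_or_directory out) := by unfold Spec_symbolic_to_numeric_permissions; infer_instance

-- ===== CLAIM (what is proved, stated in full; the proofs are below) =====
def Claim_equal_symbolic_to_numeric_permissions : Prop := ∀ (symbolic_perm : String) (is_exe_or_directory : Bool), Dom_symbolic_to_numeric_permissions symbolic_perm is_exe_or_directory → Spec_symbolic_to_numeric_permissions symbolic_perm is_exe_or_directory (symbolic_to_numeric_permissions symbolic_perm is_exe_or_directory)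

-- ===== LEMMAS AND PROOFS =====

-- pyPartition1's middle component is [] (not found) or the singleton separator
theorem part_op_shape (l : List Char) (c : Char) :
    (pyPartition1 l c).2.1 = [] ∨ (pyPartition1 l c).2.1 = [c] := by
  induction l with
  | nil => left; rfl
  | cons h t ih =>
    by_cases hc : h = c <;> simp [pyPartition1, hc, ih]

-- when the separator is absent, pyPartition1 returns (l, [], [])
theorem part_notFound (l : List Char) (c : Char) (h : (pyPartition1 l c).2.1 = []) :
    pyPartition1 l c = (l, [], []) := by
  induction l with
  | nil => rfl
  | cons a t ih =>
    by_cases hc : a = c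
    · simp [pyPartition1, hc] at h
    · simp [pyPartition1, hc] at h ⊢
      have := ih h
      simp [this]

-- when found, pyPartition1 splits l as take n / [c] / drop (n+1)
theorem part_found (l : List Char) (c : Char) (h : (pyPartition1 l c).2.1 ≠ []) :
    ∃ n : Nat, n < l.length ∧ pyPartition1 l c = (l.take n, [c], l.drop (n + 1)) := by
  induction l with
  | nil => simp [pyPartition1] at h
  | cons a t ih =>
    by_cases hc : a = c
    · exact ⟨0, by simp, by simp [pyPartition1, hc]⟩
    · simp [pyPartition1, hc] at h ⊢
      obtain ⟨n, hn, heq⟩ := ih h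
      exact ⟨n + 1, by simpa using hn, by simp [pyPartition1, hc, heq]⟩

-- find for a single-char needle agrees with pyPartition1
theorem findgo_part (c : Char) (l : List Char) (k : Nat) :
    PySem.Chars.find.go [c] l k =
      (if (pyPartition1 l c).2.1 = [] then (-1 : Int)
       else (k : Int) + ((pyPartition1 l c).1.length : Int)) := by
  induction l generalizing k with
  | nil => simp [PySem.Chars.find.go, pyPartition1]
  | cons a t ih =>
    by_cases hc : a = c
    · subst hc
      simp [PySem.Chars.find.go, pyPartition1, List.isPrefixOf]
    · have hpre : [c].isPrefixOf (a :: t) = false := by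
        simp [List.isPrefixOf]
        intro h; exact absurd h.symm hc
      rw [PySem.Chars.find.go]
      simp only [hpre, Bool.false_eq_true, if_false]
      rw [ih (k + 1)]
      simp [pyPartition1, hc]
      split
      · rfl
      · push_cast; ring

theorem find_part (c : Char) (l : List Char) :
    PySem.Chars.find l [c] =
      (if (pyPartition1 l c).2.1 = [] then (-1 : Int)
       else ((pyPartition1 l c).1.length : Int)) := by
  have := findgo_part c l 0
  simpa [PySem.Chars.find] using this

-- str.count with a single-char needle counts occurrences
theorem countgo_singleton (c : Char) (l : List Char) (fuel acc : Nat)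
    (hf : l.length ≤ fuel) :
    PySem.Chars.count.go [c] fuel l acc = acc + l.count c := by
  induction l generalizing fuel acc with
  | nil => cases fuel <;> simp [PySem.Chars.count.go]
  | cons a t ih =>
    cases fuel with
    | zero => simp at hf
    | succ f =>
      by_cases hc : c = a
      · subst hc
        have hpre : [c].isPrefixOf (c :: t) = true := by
          simp [List.isPrefixOf]
        rw [PySem.Chars.count.go]
        simp only [hpre, if_pos]
        have hlen : List.drop [c].length (c :: t) = t := by simp
        rw [hlen, ih f (acc + 1) (by simpa using Nat.le_of_succ_le_succ hf)]
        simp [List.count_cons]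
        omega
      · have hpre : [c].isPrefixOf (a :: t) = false := by
          simp [List.isPrefixOf]
          intro h; exact absurd h hc
        rw [PySem.Chars.count.go]
        simp only [hpre, Bool.false_eq_true, if_false]
        rw [ih f acc (by simpa using Nat.le_of_succ_le_succ hf)]
        simp [List.count_cons, Ne.symm hc]

theorem count_singleton (c : Char) (l : List Char) :
    PySem.Chars.count l [c] = l.count c := by
  unfold PySem.Chars.count
  simp only [List.isEmpty_cons, if_false, Bool.false_eq_true]
  simpa using countgo_singleton c l l.length 0 le_rfl

-- A's dict get? returns none off the five keys.
theorem get?_notkey (exe : Bool) (c : Char) (hr : c ≠ 'r') (hw : c ≠ 'w') (hx : c ≠ 'x')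
    (hX : c ≠ 'X') (hd : c ≠ '-') : (permValuesA exe).get? c = none := by
  simp [permValuesA, PySem.Dict.ofList, PySem.Dict.empty, PySem.Dict.update,
    PySem.Dict.insert, PySem.Dict.get?,
    Ne.symm hr, Ne.symm hw, Ne.symm hx, Ne.symm hX, Ne.symm hd]

-- .upper() of a char that is none of the five keys is not a key either (the fallback is dead).
theorem upperChar_ne (c : Char) (hx : c ≠ 'x') (hX : c ≠ 'X') (hd : c ≠ '-')
    (hr : c ≠ 'r') (hw : c ≠ 'w') :
    PySem.Chars.upperChar c ≠ 'r' ∧ PySem.Chars.upperChar c ≠ 'w' ∧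
    PySem.Chars.upperChar c ≠ 'x' ∧ PySem.Chars.upperChar c ≠ 'X' ∧
    PySem.Chars.upperChar c ≠ '-' := by
  have h120 : c.toNat ≠ 120 := by
    intro h
    apply hx
    have h2 := Char.ofNat_toNat c
    rw [h] at h2
    exact h2.symm.trans (by decide)
  unfold PySem.Chars.upperChar PySem.Chars.islower
  split
  · rename_i h
    simp only [Bool.and_eq_true, decide_eq_true_eq, Char.le_def] at h
    have h1 : 97 ≤ c.toNat := h.1
    have h2 : c.toNat ≤ 122 := h.2
    have hv : (c.toNat - 32).isValidChar := by left; omega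
    refine ⟨?_, ?_, ?_, ?_, ?_⟩ <;>
      (intro hc;
       have := congrArg Char.toNat hc;
       rw [Char.toNat_ofNat, if_pos hv] at this;
       simp only [show ('r').toNat = 114 from rfl, show ('w').toNat = 119 from rfl,
         show ('x').toNat = 120 from rfl, show ('X').toNat = 88 from rfl,
         show ('-').toNat = 45 from rfl] at this <;> omega)
  · exact ⟨hr, hw, hx, hX, hd⟩

-- A's dict lookup with the dead .upper() fallback equals the plain r/w/x/X table, per character.
theorem lookupA_eq (exe : Bool) (c : Char) :
    lookupA (permValuesA exe) c =
      (if c = 'r' then 4 else if c = 'w' then 2 else if c = 'x' then 1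
       else if c = 'X' then (if exe then 1 else 0) else 0) := by
  by_cases hr : c = 'r'; · subst hr; cases exe <;> decide
  by_cases hw : c = 'w'; · subst hw; cases exe <;> decide
  by_cases hx : c = 'x'; · subst hx; cases exe <;> decide
  by_cases hX : c = 'X'; · subst hX; cases exe <;> decide
  by_cases hd : c = '-'; · subst hd; cases exe <;> decide
  obtain ⟨u1, u2, u3, u4, u5⟩ := upperChar_ne c hx hX hd hr hw
  simp [lookupA, PySem.Dict.getD, get?_notkey exe _ hr hw hx hX hd,
    get?_notkey exe _ u1 u2 u3 u4 u5, hr, hw, hx, hX]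

-- B's weighted character counts equal A's sum of per-char dict lookups
theorem psum_eq (exe : Bool) (perms : List Char) :
    4 * (perms.count 'r' : Int) + 2 * (perms.count 'w' : Int)
      + (perms.count 'x' : Int)
      + (if exe then (1 : Int) else 0) * (perms.count 'X' : Int)
    = (perms.map (lookupA (permValuesA exe))).sum := by
  induction perms with
  | nil => simp
  | cons p rest ih =>
    simp only [List.map_cons, List.sum_cons, lookupA_eq, ← ih]
    by_cases hr : p = 'r'
    · subst hr; simp [List.count_cons]; push_cast; ring
    by_cases hw : p = 'w'
    · subst hw; simp [List.count_cons]; push_cast; ring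
    by_cases hx : p = 'x'
    · subst hx; simp [List.count_cons]; push_cast; ring
    by_cases hX : p = 'X'
    · subst hX; simp [List.count_cons]; split_ifs <;> push_cast <;> ring
    · simp [List.count_cons, hr, hw, hx, hX]

-- evaluating B's parse stage once the separator scan's result is known
theorem parseB_found (x : Int) (ins : List Char) (c : Char) (n : Nat)
    (hscan : sepScanB ins ['=', '+', '-'] = ([c], (n : Int))) :
    parseB x ins = (ins.take n, [c],
      4 * (List.count 'r' (ins.drop (n + 1)) : Int)
        + 2 * (List.count 'w' (ins.drop (n + 1)) : Int)
        + (List.count 'x' (ins.drop (n + 1)) : Int)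
        + x * (List.count 'X' (ins.drop (n + 1)) : Int),
      PySem.Chars.isIn ['s'] (ins.drop (n + 1)), PySem.Chars.isIn ['t'] (ins.drop (n + 1))) := by
  have h1 := PySem.List.slice_to_natCast ins n
  have h2 : PySem.List.slice ins (some ((n : Int) + 1)) none = ins.drop (n + 1) := by
    have := PySem.List.slice_from_natCast ins (n + 1)
    push_cast at this
    exact this
  simp [parseB, hscan, h1, h2, count_singleton]

theorem parseB_notFound (x : Int) (ins : List Char)
    (hscan : sepScanB ins ['=', '+', '-'] = ([], (ins.length : Int))) :
    parseB x ins = (ins, [], 0, false, false) := by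
  have h1 : PySem.List.slice ins none (some (ins.length : Int)) = ins := by
    rw [PySem.List.slice_to_natCast]; simp
  simp [parseB, hscan, h1]
  exact ⟨by decide, by decide⟩

-- the found separator, as an index usable by parseB_found
theorem find_found (ins : List Char) (c : Char) (h : (pyPartition1 ins c).2.1 ≠ []) :
    ∃ n : Nat, PySem.Chars.find ins [c] = (n : Int) ∧
      pyPartition1 ins c = (ins.take n, [c], ins.drop (n + 1)) := by
  obtain ⟨n, hn, heq⟩ := part_found ins c h
  refine ⟨n, ?_, heq⟩
  rw [find_part, if_neg h, heq]
  simp [Nat.min_def, Nat.le_of_lt hn]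

-- B's parse stage computes exactly the data A derives per instruction
theorem parse_eq (exe : Bool) (ins : List Char) :
    parseB (if exe then 1 else 0) ins =
      ((chainA ins).1, (chainA ins).2.1,
       ((chainA ins).2.2.map (lookupA (permValuesA exe))).sum,
       PySem.Chars.isIn ['s'] (chainA ins).2.2, PySem.Chars.isIn ['t'] (chainA ins).2.2) := by
  by_cases hE : (pyPartition1 ins '=').2.1 = []
  · have f1 : PySem.Chars.find ins ['='] = -1 := by rw [find_part, if_pos hE]
    by_cases hP : (pyPartition1 ins '+').2.1 = []
    · have f2 : PySem.Chars.find ins ['+'] = -1 := by rw [find_part, if_pos hP]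
      by_cases hM : (pyPartition1 ins '-').2.1 = []
      · -- no separator at all
        have f3 : PySem.Chars.find ins ['-'] = -1 := by rw [find_part, if_pos hM]
        have hchain : chainA ins = (ins, [], []) := by
          simp [chainA, hE, hP, part_notFound ins '-' hM]
        have hscan : sepScanB ins ['=', '+', '-'] = ([], (ins.length : Int)) := by
          simp [sepScanB, f1, f2, f3]
        rw [parseB_notFound _ _ hscan, hchain]
        simp
        exact ⟨by decide, by decide⟩
      · -- '-' is the separator
        obtain ⟨n, hfind, heq⟩ := find_found ins '-' hM
        have hchain : chainA ins = (ins.take n, ['-'], ins.drop (n + 1)) := by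
          simp [chainA, hE, hP, heq]
        have hscan : sepScanB ins ['=', '+', '-'] = (['-'], (n : Int)) := by
          have hne : PySem.Chars.find ins ['-'] ≠ -1 := by rw [hfind]; omega
          simp [sepScanB, f1, f2, hne, hfind]
        rw [parseB_found _ _ _ _ hscan, hchain]
        simp only
        rw [psum_eq]
    · -- '+' is the separator
      obtain ⟨n, hfind, heq⟩ := find_found ins '+' hP
      have hchain : chainA ins = (ins.take n, ['+'], ins.drop (n + 1)) := by
        simp [chainA, hE, hP, heq]
      have hscan : sepScanB ins ['=', '+', '-'] = (['+'], (n : Int)) := by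
        have hne : PySem.Chars.find ins ['+'] ≠ -1 := by rw [hfind]; omega
        simp [sepScanB, f1, hne, hfind]
      rw [parseB_found _ _ _ _ hscan, hchain]
      simp only
      rw [psum_eq]
  · -- '=' is the separator
    obtain ⟨n, hfind, heq⟩ := find_found ins '=' hE
    have hchain : chainA ins = (ins.take n, ['='], ins.drop (n + 1)) := by
      simp [chainA, hE, heq]
    have hscan : sepScanB ins ['=', '+', '-'] = (['='], (n : Int)) := by
      have hne : PySem.Chars.find ins ['='] ≠ -1 := by rw [hfind]; omega
      simp [sepScanB, hne, hfind]
    rw [parseB_found _ _ _ _ hscan, hchain]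
    simp only
    rw [psum_eq]

-- A's per-class update, factored out of stepA (proof-only helper)
def classStepA (exe : Bool) (who trig : Char) (bitval : Int) (st : Int × Int)
    (ins : List Char) : Int × Int :=
  let t := chainA ins
  let psum := (t.2.2.map (lookupA (permValuesA exe))).sum
  if PySem.Chars.isIn [who] t.1 || PySem.Chars.isIn ['a'] t.1 then
    (updatePermA t.2.1 psum st.1,
     if PySem.Chars.isIn [trig] t.2.2 then
       (if PySem.Chars.isIn t.2.1 ['+', '='] then bitval else 0)
     else st.2)
  else st

-- one stepA updates the three (perm, bit) pairs independently
theorem stepA_classes (exe : Bool) (st : Int × Int × Int × Int × Int × Int) (ins : List Char) :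
    stepA exe st ins =
      ((classStepA exe 'u' 's' 4 (st.1, st.2.2.2.1) ins).1,
       (classStepA exe 'g' 's' 2 (st.2.1, st.2.2.2.2.1) ins).1,
       (classStepA exe 'o' 't' 1 (st.2.2.1, st.2.2.2.2.2) ins).1,
       (classStepA exe 'u' 's' 4 (st.1, st.2.2.2.1) ins).2,
       (classStepA exe 'g' 's' 2 (st.2.1, st.2.2.2.2.1) ins).2,
       (classStepA exe 'o' 't' 1 (st.2.2.1, st.2.2.2.2.2) ins).2) := by
  obtain ⟨o, g, t, su, sg, stk⟩ := st
  simp only [stepA, classStepA]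

-- transposition: A's one fold over a 6-tuple is three independent per-class folds
theorem transpose_eq (exe : Bool) (l : List (List Char)) (o g t su sg st : Int) :
    l.foldl (stepA exe) (o, g, t, su, sg, st) =
      ((l.foldl (classStepA exe 'u' 's' 4) (o, su)).1,
       (l.foldl (classStepA exe 'g' 's' 2) (g, sg)).1,
       (l.foldl (classStepA exe 'o' 't' 1) (t, st)).1,
       (l.foldl (classStepA exe 'u' 's' 4) (o, su)).2,
       (l.foldl (classStepA exe 'g' 's' 2) (g, sg)).2,
       (l.foldl (classStepA exe 'o' 't' 1) (t, st)).2) := by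
  induction l generalizing o g t su sg st with
  | nil => rfl
  | cons ins rest ih =>
    simp only [List.foldl_cons]
    rw [stepA_classes, ih]

-- the operation chainA extracts is empty or one separator
theorem chain_op_shape (ins : List Char) :
    (chainA ins).2.1 = [] ∨ (chainA ins).2.1 = ['='] ∨
    (chainA ins).2.1 = ['+'] ∨ (chainA ins).2.1 = ['-'] := by
  by_cases hE : (pyPartition1 ins '=').2.1 = []
  · by_cases hP : (pyPartition1 ins '+').2.1 = []
    · by_cases hM : (pyPartition1 ins '-').2.1 = []
      · simp [chainA, hE, hP, hM]
      · rcases part_op_shape ins '-' with h | h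
        · exact absurd h hM
        · simp [chainA, hE, hP, h]
    · rcases part_op_shape ins '+' with h | h
      · exact absurd h hP
      · simp [chainA, hE, hP, h]
  · rcases part_op_shape ins '=' with h | h
    · exact absurd h hE
    · simp [chainA, hE, h]

-- one A-side class step equals one B-side resolve step (flags scaled by bitval)
theorem classStep_resolveStep (exe : Bool) (ins : List Char) (who trig : Char) (use_t : Bool)
    (bitval p f : Int) (htrig : trig = if use_t then 't' else 's') :
    classStepA exe who trig bitval (p, bitval * f) ins =
      ((resolveStepB who use_t (p, f) (parseB (if exe then 1 else 0) ins)).1,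
       bitval * (resolveStepB who use_t (p, f) (parseB (if exe then 1 else 0) ins)).2) := by
  rw [parse_eq]
  simp only [classStepA, resolveStepB, updatePermA]
  have hflag : ∀ b : Bool,
      (if b then (if PySem.Chars.isIn (chainA ins).2.1 ['+', '='] then bitval else 0)
       else bitval * f) =
      bitval * (if b then (if (chainA ins).2.1 = ['-'] then (0 : Int) else 1) else f) := by
    intro b
    cases b
    · simp
    · simp only [if_true]
      rcases chain_op_shape ins with h | h | h | h <;> rw [h] <;>
        simp [show PySem.Chars.isIn ([] : List Char) ['+', '='] = true from by decide,
          show PySem.Chars.isIn ['='] ['+', '='] = true from by decide,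
          show PySem.Chars.isIn ['+'] ['+', '='] = true from by decide,
          show PySem.Chars.isIn ['-'] ['+', '='] = false from by decide]
  cases hcond : (PySem.Chars.isIn [who] (chainA ins).1 || PySem.Chars.isIn ['a'] (chainA ins).1)
  · simp [hcond]
  · subst htrig
    cases use_t <;> simp only [hcond, if_true, if_false, Bool.false_eq_true] <;>
      rw [hflag]

-- per class: A's fold with bit values {0, bitval} tracks B's fold with flags {0, 1}
theorem class_eq (exe : Bool) (l : List (List Char)) (who trig : Char) (use_t : Bool)
    (bitval p f : Int) (htrig : trig = if use_t then 't' else 's') :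
    l.foldl (classStepA exe who trig bitval) (p, bitval * f) =
      (((l.map (parseB (if exe then 1 else 0))).foldl (resolveStepB who use_t) (p, f)).1,
       bitval * ((l.map (parseB (if exe then 1 else 0))).foldl (resolveStepB who use_t) (p, f)).2) := by
  induction l generalizing p f with
  | nil => rfl
  | cons ins rest ih =>
    simp only [List.map_cons, List.foldl_cons]
    rw [classStep_resolveStep exe ins who trig use_t bitval p f htrig]
    exact ih _ _


-- ===== VERDICT (by name: the statement is the Claim_ definition above) =====
theorem symbolic_to_numeric_permissions_spec : Claim_equal_symbolic_to_numeric_permissions := by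
  intro s exe _
  unfold Spec_symbolic_to_numeric_permissions
  unfold symbolic_to_numeric_permissions symbolic_to_numeric_permissions_alt resolveB
  simp only [transpose_eq]
  have hu := class_eq exe (PySem.Chars.splitOn s.toList [',']) 'u' 's' false 4 0 0 rfl
  have hg := class_eq exe (PySem.Chars.splitOn s.toList [',']) 'g' 's' false 2 0 0 rfl
  have ho := class_eq exe (PySem.Chars.splitOn s.toList [',']) 'o' 't' true 1 0 0 rfl
  norm_num at hu hg ho
  rw [hu, hg, ho]
  ring
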